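-- pv_equiv track=rewrite | github.com/kleur/adventofcode | 2020/6/day6.py | sum_of_questions_anyone
-- ===== SOURCE A (Python) =====
-- def sum_of_questions_anyone(raw_lines):
--     count = 0
--     current_set = set()
--     for i in range(0, len(raw_lines)):
--         if raw_lines[i] != "":
--             for c in raw_lines[i]:
--                 current_set.add(c)
--         if raw_lines[i] == "" or i == len(raw_lines) - 1:
--             count += len(current_set)
--             current_set = set()
--     return count
-- ===== SOURCE B (Python) =====
-- def sum_of_questions_anyone(raw_lines):
--     groups = []
--     current = []
--     for line in raw_lines:
--         if line == "":
--             groups.append(current)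
--             current = []
--         else:
--             current.append(line)
--     groups.append(current)
--     return sum(len(set("".join(group))) for group in groups)
-- ===== Notes on version B (the rewrite author's own statement) =====
-- stated objective: simpler
-- what changed: B first partitions the lines into an explicit list of groups (flushing on blank lines, plus the trailing group), then sums len(set("".join(group))) per group, instead of A's index loop that flushes a running character set inline on blanks and on the last index.
import Mathlib
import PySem

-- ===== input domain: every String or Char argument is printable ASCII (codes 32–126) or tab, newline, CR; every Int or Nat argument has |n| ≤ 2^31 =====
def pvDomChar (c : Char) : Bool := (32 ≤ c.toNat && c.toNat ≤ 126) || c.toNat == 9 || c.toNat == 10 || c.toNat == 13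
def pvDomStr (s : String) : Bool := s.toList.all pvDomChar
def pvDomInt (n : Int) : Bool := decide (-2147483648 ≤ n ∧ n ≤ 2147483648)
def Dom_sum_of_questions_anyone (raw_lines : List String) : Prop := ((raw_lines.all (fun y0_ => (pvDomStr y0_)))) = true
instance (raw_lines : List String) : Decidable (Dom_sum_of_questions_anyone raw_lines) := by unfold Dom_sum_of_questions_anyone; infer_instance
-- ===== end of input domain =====

-- B separates partitioning into groups from counting distinct characters, instead of A's
-- inline flush of a running set; same return value (objective: simpler decomposition).


-- ===== PORT A =====
def sum_of_questions_anyone (raw_lines : List String) : Int :=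
  (((PySem.List.pyRange 0 raw_lines.length).foldl
    (fun (st : Int × PySem.Set Char) i =>
      let line := PySem.List.pyGetD raw_lines i ""
      let s := if line ≠ "" then line.toList.foldl PySem.Set.add st.2 else st.2
      if line = "" ∨ i = (raw_lines.length : Int) - 1 then
        (st.1 + PySem.Set.len s, PySem.Set.empty)
      else (st.1, s))
    (0, PySem.Set.empty))).1

-- ===== PORT B =====
def sum_of_questions_anyone_alt (raw_lines : List String) : Int :=
  let st := raw_lines.foldl
    (fun (st : List (List String) × List String) line =>
      if line = "" then (st.1 ++ [st.2], ([] : List String)) else (st.1, st.2 ++ [line]))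
    ([], [])
  let groups := st.1 ++ [st.2]
  (groups.map (fun g => PySem.Set.len (PySem.Set.ofList (PySem.Str.join "" g).toList))).sum

-- ===== PRECONDITION & SPEC =====
def Spec_sum_of_questions_anyone (raw_lines : List String) (out : Int) : Prop := out = sum_of_questions_anyone_alt raw_lines
instance (raw_lines : List String) (out : Int) : Decidable (Spec_sum_of_questions_anyone raw_lines out) := by unfold Spec_sum_of_questions_anyone; infer_instance

-- ===== CLAIM (what is proved, stated in full; the proofs are below) =====
def Claim_equal_sum_of_questions_anyone : Prop := ∀ (raw_lines : List String), Dom_sum_of_questions_anyone raw_lines → Spec_sum_of_questions_anyone raw_lines (sum_of_questions_anyone raw_lines)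

-- ===== LEMMAS AND PROOFS =====
-- common spec: process the remaining lines with the pending character set s;
-- the base case returns the pending set's size (B's trailing-group flush)
def pvF : List String → PySem.Set Char → Int
  | [], s => PySem.Set.len s
  | x :: rest, s =>
    let s' := if x ≠ "" then x.toList.foldl PySem.Set.add s else s
    if x = "" ∨ rest = [] then PySem.Set.len s' + pvF rest PySem.Set.empty
    else pvF rest s'

-- the characters of a group, flattened in order
def pvChars (g : List String) : List Char := (g.map String.toList).flatten

lemma pv_chars_join (g : List String) :
    PySem.Chars.join [] (g.map String.toList) = pvChars g := by
  unfold pvChars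
  generalize g.map String.toList = l
  induction l with
  | nil => rfl
  | cons x xs ih => cases xs <;> simp_all [PySem.Chars.join, List.intercalate]

lemma pv_join_chars (g : List String) :
    (PySem.Str.join "" g).toList = pvChars g := by
  rw [PySem.Str.toList_join]
  exact pv_chars_join g

-- A's loop over the indices [pre.length, full.length) of full = pre ++ suf,
-- started with (count, s), adds pvF suf s to count (for nonempty suf)
lemma pv_loopA (full : List String) (suf : List String) : ∀ (pre : List String),
    full = pre ++ suf → ∀ (count : Int) (s : PySem.Set Char), suf ≠ [] →
    (((PySem.List.pyRange pre.length full.length).foldl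
      (fun (st : Int × PySem.Set Char) i =>
        let line := PySem.List.pyGetD full i ""
        let s := if line ≠ "" then line.toList.foldl PySem.Set.add st.2 else st.2
        if line = "" ∨ i = (full.length : Int) - 1 then
          (st.1 + PySem.Set.len s, PySem.Set.empty)
        else (st.1, s))
      (count, s))).1 = count + pvF suf s := by
  induction suf with
  | nil => intro _ _ _ _ h; exact absurd rfl h
  | cons x rest ih =>
    intro pre hfull count s _
    have hlt : (pre.length : Int) < (full.length : Int) := by
      subst hfull; simp only [List.length_append, List.length_cons]; omega
    rw [PySem.List.pyRange_one_cons hlt]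
    have hget : PySem.List.pyGetD full (pre.length : Int) "" = x := by
      rw [PySem.List.pyGetD_natCast]
      subst hfull
      simp [List.getD_eq_getElem?_getD]
    simp only [List.foldl_cons, hget]
    have hlast : ((pre.length : Int) = (full.length : Int) - 1) ↔ rest = [] := by
      subst hfull
      simp only [List.length_append, List.length_cons]
      constructor
      · intro h
        have : rest.length = 0 := by omega
        exact List.length_eq_zero_iff.mp this
      · intro h; subst h; simp only [List.length_nil]; omega
    have hstep : (pre.length : Int) + 1 = ((pre.length + 1 : Nat) : Int) := by push_cast; ring
    by_cases hflush : x = "" ∨ rest = []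
    · have hc : (x = "" ∨ (pre.length : Int) = (full.length : Int) - 1) := by
        rcases hflush with h | h
        · exact Or.inl h
        · exact Or.inr (hlast.mpr h)
      simp only [if_pos hc]
      rcases Decidable.em (rest = []) with hr | hr
      · subst hr
        have hfl : (full.length : Int) = (pre.length : Int) + 1 := by
          subst hfull; simp only [List.length_append, List.length_cons, List.length_nil]; omega
        rw [hfl]
        rw [show PySem.List.pyRange ((pre.length : Int) + 1) ((pre.length : Int) + 1) = []
          from by simp [PySem.List.pyRange]]
        simp only [List.foldl_nil]
        have hpv : pvF [x] s
            = PySem.Set.len (if x ≠ "" then x.toList.foldl PySem.Set.add s else s) := by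
          simp [pvF, PySem.Set.len, PySem.Set.empty]
        rw [hpv]
      · have := ih (pre ++ [x]) (by subst hfull; simp) (count + PySem.Set.len
          (if x ≠ "" then x.toList.foldl PySem.Set.add s else s)) PySem.Set.empty hr
        simp only [List.length_append, List.length_cons, List.length_nil] at this
        rw [hstep, this]
        have hpv : pvF (x :: rest) s
            = PySem.Set.len (if x ≠ "" then x.toList.foldl PySem.Set.add s else s)
              + pvF rest PySem.Set.empty := by
          simp only [pvF]
          rw [if_pos hflush]
        rw [hpv]
        ring
    · push_neg at hflush
      have hc : ¬ (x = "" ∨ (pre.length : Int) = (full.length : Int) - 1) := by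
        rintro (h | h)
        · exact hflush.1 h
        · exact hflush.2 (hlast.mp h)
      simp only [if_neg hc]
      have := ih (pre ++ [x]) (by subst hfull; simp) count
        (if x ≠ "" then x.toList.foldl PySem.Set.add s else s) hflush.2
      simp only [List.length_append, List.length_cons, List.length_nil] at this
      rw [hstep, this]
      have hpv : pvF (x :: rest) s
          = pvF rest (if x ≠ "" then x.toList.foldl PySem.Set.add s else s) := by
        simp only [pvF]
        rw [if_neg (by simp [hflush.1, hflush.2])]
      rw [hpv]

-- A's result equals pvF on a nonempty list
lemma pv_A_eq (raw_lines : List String) (h : raw_lines ≠ []) :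
    sum_of_questions_anyone raw_lines = pvF raw_lines PySem.Set.empty := by
  unfold sum_of_questions_anyone
  have := pv_loopA raw_lines raw_lines [] (by simp) 0 PySem.Set.empty h
  simp only [List.length_nil] at this
  rw [show ((0:Nat):Int) = 0 from rfl] at this
  rw [this]; ring

-- appending one nonblank line to the pending group = folding its chars into the set
lemma pv_set_snoc (cur : List String) (x : String) :
    PySem.Set.ofList (pvChars (cur ++ [x])) =
      x.toList.foldl PySem.Set.add (PySem.Set.ofList (pvChars cur)) := by
  unfold pvChars
  rw [List.map_append, List.flatten_append]
  simp [PySem.Set.ofList_append, PySem.Set.update]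

-- B's partition fold, summed, equals the already-closed groups plus pvF of the rest
lemma pv_loopB (raw_lines : List String) : ∀ (acc : List (List String)) (cur : List String),
    (((raw_lines.foldl
        (fun (st : List (List String) × List String) line =>
          if line = "" then (st.1 ++ [st.2], ([] : List String)) else (st.1, st.2 ++ [line]))
        (acc, cur)).1 ++
      [(raw_lines.foldl
        (fun (st : List (List String) × List String) line =>
          if line = "" then (st.1 ++ [st.2], ([] : List String)) else (st.1, st.2 ++ [line]))
        (acc, cur)).2]).map
      (fun g => PySem.Set.len (PySem.Set.ofList (PySem.Str.join "" g).toList))).sum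
      = (acc.map (fun g => PySem.Set.len (PySem.Set.ofList (PySem.Str.join "" g).toList))).sum
        + pvF raw_lines (PySem.Set.ofList (pvChars cur)) := by
  induction raw_lines with
  | nil =>
    intro acc cur
    simp only [List.foldl_nil, List.map_append, List.sum_append, List.map_cons,
      List.map_nil, List.sum_cons, List.sum_nil, pvF]
    rw [pv_join_chars]
    ring
  | cons x rest ih =>
    intro acc cur
    by_cases hx : x = ""
    · subst hx
      simp only [List.foldl_cons, reduceIte]
      rw [ih (acc ++ [cur]) []]
      have hpv : pvF (("" : String) :: rest) (PySem.Set.ofList (pvChars cur))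
          = PySem.Set.len (PySem.Set.ofList (pvChars cur)) + pvF rest PySem.Set.empty := by
        simp [pvF]
      rw [hpv]
      simp only [List.map_append, List.sum_append, List.map_cons, List.map_nil,
        List.sum_cons, List.sum_nil]
      rw [pv_join_chars]
      rw [show PySem.Set.ofList (pvChars ([] : List String)) = (PySem.Set.empty : PySem.Set Char)
        from rfl]
      ring
    · simp only [List.foldl_cons, if_neg hx]
      rw [ih acc (cur ++ [x]), pv_set_snoc]
      rcases Decidable.em (rest = []) with hr | hr
      · subst hr
        have h1 : pvF [] (x.toList.foldl PySem.Set.add (PySem.Set.ofList (pvChars cur)))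
            = PySem.Set.len (x.toList.foldl PySem.Set.add (PySem.Set.ofList (pvChars cur))) := rfl
        have h2 : pvF [x] (PySem.Set.ofList (pvChars cur))
            = PySem.Set.len (x.toList.foldl PySem.Set.add (PySem.Set.ofList (pvChars cur))) := by
          simp [pvF, hx, PySem.Set.len, PySem.Set.empty]
        rw [h1, h2]
      · have hpv : pvF (x :: rest) (PySem.Set.ofList (pvChars cur))
            = pvF rest (x.toList.foldl PySem.Set.add (PySem.Set.ofList (pvChars cur))) := by
          simp only [pvF]
          rw [if_neg (by simp [hx, hr])]
          simp [hx]
        rw [hpv]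

-- B's result equals pvF on every list
lemma pv_B_eq (raw_lines : List String) :
    sum_of_questions_anyone_alt raw_lines = pvF raw_lines PySem.Set.empty := by
  unfold sum_of_questions_anyone_alt
  have := pv_loopB raw_lines [] []
  simp only [List.map_nil, List.sum_nil, zero_add] at this
  simpa [pvChars, PySem.Set.empty] using this

-- ===== VERDICT (by name: the statement is the Claim_ definition above) =====
theorem sum_of_questions_anyone_spec : Claim_equal_sum_of_questions_anyone := by
  intro raw_lines _
  unfold Spec_sum_of_questions_anyone
  rcases Decidable.em (raw_lines = []) with h | h
  · subst h; decide
  · rw [pv_A_eq raw_lines h, pv_B_eq raw_lines]
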